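-- pv_equiv track=rewrite | github.com/aihearticu/connectx-championship-agent | organized/agents/hybrid_agent_v2.py | _count_patterns
-- ===== SOURCE A (Python) =====
-- def _count_patterns(board, player, length):
--     """Count patterns of given length"""
--     count = 0
--     b = [board[i:i+7] for i in range(0, 42, 7)]
--
--     # Horizontal
--     for row in range(6):
--         for col in range(8 - length):
--             window = [b[row][col+i] for i in range(length)]
--             if all(p == player or p == 0 for p in window) and window.count(player) == length - 1:
--                 count += 1
--
--     # Vertical
--     for col in range(7):
--         for row in range(7 - length):
--             window = [b[row+i][col] for i in range(length)]
--             if all(p == player or p == 0 for p in window) and window.count(player) == length - 1: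
--                 count += 1
--
--     return count
-- ===== SOURCE B (Python) =====
-- def _count_line(line, player, length):
--     """Sliding-window count of near-complete windows in one line."""
--     n = len(line)
--     if length < 1 or length > n:
--         return 0
--     cp = sum(1 for x in line[:length] if x == player)
--     co = sum(1 for x in line[:length] if x != player and x != 0)
--     hits = 1 if co == 0 and cp == length - 1 else 0
--     for s in range(n - length):
--         out_v, in_v = line[s], line[s + length]
--         cp += (1 if in_v == player else 0) - (1 if out_v == player else 0)
--         co += (1 if in_v != player and in_v != 0 else 0) - (1 if out_v != player and out_v != 0 else 0)
--         if co == 0 and cp == length - 1: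
--             hits += 1
--     return hits
--
--
-- def _count_patterns(board, player, length):
--     """Count patterns of given length"""
--     rows = [board[i:i+7] for i in range(0, 42, 7)]
--     cols = [list(t) for t in zip(*rows)]
--     total = 0
--     for line in rows:
--         total += _count_line(line, player, length)
--     for line in cols:
--         total += _count_line(line, player, length)
--     return total
-- ===== Notes on version B (the rewrite author's own statement) =====
-- stated objective: alternative
-- what changed: A rescans every length-L window from scratch in two separately-indexed passes (rows via b[row][col+i], columns via b[row+i][col]); B zip-transposes the grid once and runs a single generic sliding-window scanner over each of the 13 lines, maintaining player/other counters incrementally in O(1) per step instead of rebuilding and recounting each window.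
import Mathlib
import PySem

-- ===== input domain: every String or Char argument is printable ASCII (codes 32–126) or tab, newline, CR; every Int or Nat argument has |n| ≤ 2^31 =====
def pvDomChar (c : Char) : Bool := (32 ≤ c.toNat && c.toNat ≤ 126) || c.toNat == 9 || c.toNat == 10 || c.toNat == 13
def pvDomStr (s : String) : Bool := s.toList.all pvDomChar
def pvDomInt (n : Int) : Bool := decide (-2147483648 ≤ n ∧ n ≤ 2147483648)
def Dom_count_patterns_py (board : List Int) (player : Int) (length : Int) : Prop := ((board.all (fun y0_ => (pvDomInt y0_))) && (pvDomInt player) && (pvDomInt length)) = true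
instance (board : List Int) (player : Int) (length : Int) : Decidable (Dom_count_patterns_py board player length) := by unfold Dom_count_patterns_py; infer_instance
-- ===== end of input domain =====

-- B replaces A's per-window rescans by a zip-transpose plus ONE incremental sliding-window
-- pass per line, maintaining two counters in O(1) per step (objective: alternative).

-- ===== PORT A =====
def count_patterns_py (board : List Int) (player : Int) (length : Int) : Int :=
  let count : Int := 0
  let b := (PySem.List.pyRange 0 42 7).map (fun i => PySem.List.slice board (some i) (some (i + 7)))
  -- Horizontal
  let count := (PySem.List.pyRange 0 6 1).foldl (fun count row =>
    (PySem.List.pyRange 0 (8 - length) 1).foldl (fun count col =>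
      let window := (PySem.List.pyRange 0 length 1).map
        (fun i => PySem.List.pyGetD (PySem.List.pyGetD b row []) (col + i) 0)
      if (window.all fun p => p == player || p == 0) && ((PySem.List.count window player : Int) == length - 1)
      then count + 1 else count) count) count
  -- Vertical
  let count := (PySem.List.pyRange 0 7 1).foldl (fun count col =>
    (PySem.List.pyRange 0 (7 - length) 1).foldl (fun count row =>
      let window := (PySem.List.pyRange 0 length 1).map
        (fun i => PySem.List.pyGetD (PySem.List.pyGetD b (row + i) []) col 0)
      if (window.all fun p => p == player || p == 0) && ((PySem.List.count window player : Int) == length - 1)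
      then count + 1 else count) count) count
  count

-- ===== PORT B =====
def pvCountLine (line : List Int) (player : Int) (length : Int) : Int :=
  let n : Int := line.length
  if length < 1 || n < length then 0
  else
    let cp : Int := ((PySem.List.slice line none (some length)).countP (fun x => x == player) : Int)
    let co : Int := ((PySem.List.slice line none (some length)).countP (fun x => x != player && x != 0) : Int)
    let hits : Int := if co == 0 && cp == length - 1 then 1 else 0
    let st := (PySem.List.pyRange 0 (n - length) 1).foldl
      (fun (st : Int × Int × Int) s =>
        let outv := PySem.List.pyGetD line s 0
        let inv := PySem.List.pyGetD line (s + length) 0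
        let cp := st.1 + (if inv == player then (1:Int) else 0) - (if outv == player then (1:Int) else 0)
        let co := st.2.1 + (if inv != player && inv != 0 then (1:Int) else 0)
                        - (if outv != player && outv != 0 then (1:Int) else 0)
        let hits := if co == 0 && cp == length - 1 then st.2.2 + 1 else st.2.2
        (cp, co, hits)) (cp, co, hits)
    st.2.2

-- exact port of Python's n-ary zip(*rows): emit a column of heads while no list is
-- exhausted (structural recursion on the first list, which zip also stops at)
def pvZipGo : List Int → List (List Int) → List (List Int)
  | [], _ => []
  | a :: t, rest =>
    if rest.all (fun l => !l.isEmpty) then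
      (a :: rest.map (fun l => l.headD 0)) :: pvZipGo t (rest.map List.tail)
    else []

def pvZipT (ls : List (List Int)) : List (List Int) :=
  match ls with
  | [] => []
  | l0 :: rest => pvZipGo l0 rest

def count_patterns_py_alt (board : List Int) (player : Int) (length : Int) : Int :=
  let rows := (PySem.List.pyRange 0 42 7).map (fun i => PySem.List.slice board (some i) (some (i + 7)))
  let cols := pvZipT rows
  let total := rows.foldl (fun t line => t + pvCountLine line player length) 0
  let total := cols.foldl (fun t line => t + pvCountLine line player length) total
  total

-- ===== PRECONDITION & SPEC =====
-- Pre_ excludes exactly the inputs where Python A raises IndexError (a board shorter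
-- than 42 cells together with a window length 1..7 that makes A index into the grid);
-- for length <= 0 and length >= 8 A indexes nothing and returns 0 on any board.
def Pre_count_patterns_py (board : List Int) (player : Int) (length : Int) : Prop :=
  (1 ≤ length ∧ length ≤ 7) → 42 ≤ board.length
instance (board : List Int) (player : Int) (length : Int) : Decidable (Pre_count_patterns_py board player length) := by unfold Pre_count_patterns_py; infer_instance

def pvWitness_count_patterns_py : List Int × Int × Int :=
  ([0,0,0,0,0,0,0, 0,0,0,0,0,0,0, 0,0,0,0,0,0,0, 0,0,0,0,0,0,0, 0,0,0,0,0,0,0, 1,1,0,2,2,2,0], 2, 4)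

def Spec_count_patterns_py (board : List Int) (player : Int) (length : Int) (out : Int) : Prop := out = count_patterns_py_alt board player length
instance (board : List Int) (player : Int) (length : Int) (out : Int) : Decidable (Spec_count_patterns_py board player length out) := by unfold Spec_count_patterns_py; infer_instance

-- ===== CLAIM (what is proved, stated in full; the proofs are below) =====
def Claim_equal_count_patterns_py : Prop := ∀ (board : List Int) (player : Int) (length : Int), Dom_count_patterns_py board player length → Pre_count_patterns_py board player length → Spec_count_patterns_py board player length (count_patterns_py board player length)

-- ===== LEMMAS AND PROOFS =====

def pvCond (player length : Int) (w : List Int) : Bool :=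
  (w.all fun p => p == player || p == 0) && ((PySem.List.count w player : Int) == length - 1)

def pvWin (line : List Int) (Ln s : Nat) : List Int := (line.drop s).take Ln

lemma pvCond_iff (p L : Int) (w : List Int) :
    pvCond p L w = true ↔
      ((w.countP fun x => x != p && x != 0) = 0 ∧ ((w.countP fun x => x == p : Nat) : Int) = L - 1) := by
  simp [pvCond, List.all_eq_true, PySem.List.count_eq, List.count_eq_countP, List.countP_eq_zero]
  intro _
  constructor <;> intro h x hx <;> have := h x hx <;> tauto

lemma pvCond_check (p L : Int) (w : List Int) :
    ((((w.countP fun x => x != p && x != 0 : Nat) : Int) == 0) && (((w.countP fun x => x == p : Nat) : Int) == L - 1)) = pvCond p L w := by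
  rw [Bool.eq_iff_iff]
  simp [pvCond_iff]

lemma pvWin_eq_map (line : List Int) (L : Int) (s : Nat) (hL : 1 ≤ L)
    (h : s + L.toNat ≤ line.length) :
    ((PySem.List.pyRange 0 L 1).map fun i => PySem.List.pyGetD line ((s : Int) + i) 0)
      = pvWin line L.toNat s := by
  rw [PySem.List.pyRange_one, List.map_map]
  apply List.ext_getElem
  · simp [pvWin]; omega
  · intro k hk1 hk2
    simp only [List.getElem_map, List.getElem_range, Function.comp]
    have e : ((s : Int) + ((0 : Int) + (k : Int))) = ((s + k : Nat) : Int) := by push_cast; ring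
    rw [e, PySem.List.pyGetD_natCast]
    have hk : k < L.toNat := by simpa using hk1
    have hsk : s + k < line.length := by omega
    simp [pvWin, List.getD_eq_getElem?_getD, List.getElem?_eq_getElem hsk]

lemma pvStep_count (line : List Int) (q : Int → Bool) (m s : Nat)
    (h : s + 1 + (m + 1) ≤ line.length) :
    (pvWin line (m + 1) (s + 1)).countP q + (if q (line.getD s 0) then 1 else 0)
      = (pvWin line (m + 1) s).countP q + (if q (line.getD (s + m + 1) 0) then 1 else 0) := by
  have hs : s < line.length := by omega
  have h2 : s + m + 1 < line.length := by omega
  have e1 : pvWin line (m + 1) s = line.getD s 0 :: pvWin line m (s + 1) := by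
    unfold pvWin
    rw [List.drop_eq_getElem_cons hs, List.take_succ_cons, List.getD_eq_getElem?_getD,
      List.getElem?_eq_getElem hs, Option.getD_some]
  have e2 : pvWin line (m + 1) (s + 1) = pvWin line m (s + 1) ++ [line.getD (s + m + 1) 0] := by
    have hm : m < (line.drop (s + 1)).length := by simp; omega
    simp [pvWin, List.take_add_one, List.getElem?_eq_getElem hm, List.getD_eq_getElem?_getD,
      List.getElem?_eq_getElem h2]
    congr 1
    omega
  rw [e1, e2]
  simp [List.countP_cons, List.countP_append]
  split_ifs <;> omega

lemma pvStep_count' (line : List Int) (q : Int → Bool) (m s : Nat)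
    (h : s + 1 + (m + 1) ≤ line.length) :
    (pvWin line (m + 1) (s + 1)).countP q + (if q (line.getD s 0) then 1 else 0)
      = (pvWin line (m + 1) s).countP q + (if q (line.getD (s + (m + 1)) 0) then 1 else 0) := by
  have e : s + (m + 1) = s + m + 1 := by omega
  rw [e]
  exact pvStep_count line q m s h

lemma pvFoldlHead {α β : Type} (f : α → β → α) (x : β) (l : List β) (init st' : α)
    (h : f init x = st') : List.foldl f init (x :: l) = List.foldl f st' l := by
  rw [List.foldl_cons, h]

lemma pvSlide (line : List Int) (p L : Int) (hL : 1 ≤ L) :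
    ∀ (k s : Nat) (hits : Int), s + k + L.toNat = line.length →
    ((PySem.List.pyRange (s : Int) ((line.length : Int) - L) 1).foldl
      (fun (st : Int × Int × Int) t =>
        let outv := PySem.List.pyGetD line t 0
        let inv := PySem.List.pyGetD line (t + L) 0
        let cp := st.1 + (if inv == p then (1:Int) else 0) - (if outv == p then (1:Int) else 0)
        let co := st.2.1 + (if inv != p && inv != 0 then (1:Int) else 0)
                        - (if outv != p && outv != 0 then (1:Int) else 0)
        let hits := if co == 0 && cp == L - 1 then st.2.2 + 1 else st.2.2
        (cp, co, hits))
      ((((pvWin line L.toNat s).countP fun x => x == p : Nat) : Int),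
       (((pvWin line L.toNat s).countP fun x => x != p && x != 0 : Nat) : Int), hits)).2.2
    = hits + ((List.range k).map fun t =>
        if pvCond p L (pvWin line L.toNat (s + 1 + t)) then (1:Int) else 0).sum := by
  intro k
  induction k with
  | zero =>
    intro s hits hsum
    rw [PySem.List.pyRange_one_eq_nil (by omega)]
    simp
  | succ k ih =>
    intro s hits hsum
    have hlt : (s : Int) < (line.length : Int) - L := by omega
    rw [PySem.List.pyRange_one_cons hlt]
    obtain ⟨m, hm⟩ : ∃ m, L.toNat = m + 1 := ⟨L.toNat - 1, by omega⟩
    have eIdx : (s : Int) + L = ((s + L.toNat : Nat) : Int) := by push_cast; omega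
    have hstep :
        (fun (st : Int × Int × Int) t =>
          let outv := PySem.List.pyGetD line t 0
          let inv := PySem.List.pyGetD line (t + L) 0
          let cp := st.1 + (if inv == p then (1:Int) else 0) - (if outv == p then (1:Int) else 0)
          let co := st.2.1 + (if inv != p && inv != 0 then (1:Int) else 0)
                          - (if outv != p && outv != 0 then (1:Int) else 0)
          let hits := if co == 0 && cp == L - 1 then st.2.2 + 1 else st.2.2
          (cp, co, hits))
        ((((pvWin line L.toNat s).countP fun x => x == p : Nat) : Int),
         (((pvWin line L.toNat s).countP fun x => x != p && x != 0 : Nat) : Int), hits) (s : Int)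
        = ((((pvWin line L.toNat (s + 1)).countP fun x => x == p : Nat) : Int),
           (((pvWin line L.toNat (s + 1)).countP fun x => x != p && x != 0 : Nat) : Int),
           if pvCond p L (pvWin line L.toNat (s + 1)) then hits + 1 else hits) := by
      dsimp only
      rw [eIdx, PySem.List.pyGetD_natCast, PySem.List.pyGetD_natCast, hm]
      have ecp : ((((pvWin line (m + 1) s).countP fun x => x == p : Nat) : Int)
          + (if (line.getD (s + (m + 1)) 0) == p then (1:Int) else 0)
          - (if (line.getD s 0) == p then (1:Int) else 0))
          = (((pvWin line (m + 1) (s + 1)).countP fun x => x == p : Nat) : Int) := by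
        have hq := pvStep_count' line (fun x => x == p) m s (by omega)
        beta_reduce at hq
        cases hOut : (line.getD s 0 == p) <;> cases hIn : (line.getD (s + (m + 1)) 0 == p) <;>
          simp only [hOut, hIn, if_true] at hq ⊢ <;> simp at hq ⊢ <;> omega
      have eco : ((((pvWin line (m + 1) s).countP fun x => x != p && x != 0 : Nat) : Int)
          + (if (line.getD (s + (m + 1)) 0) != p && (line.getD (s + (m + 1)) 0) != 0 then (1:Int) else 0)
          - (if (line.getD s 0) != p && (line.getD s 0) != 0 then (1:Int) else 0))
          = (((pvWin line (m + 1) (s + 1)).countP fun x => x != p && x != 0 : Nat) : Int) := by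
        have hq := pvStep_count' line (fun x => x != p && x != 0) m s (by omega)
        beta_reduce at hq
        cases hOut : ((line.getD s 0 != p) && (line.getD s 0 != 0)) <;>
          cases hIn : ((line.getD (s + (m + 1)) 0 != p) && (line.getD (s + (m + 1)) 0 != 0)) <;>
          simp only [hOut, hIn, if_true] at hq ⊢ <;> simp at hq ⊢ <;> omega
      rw [ecp, eco, pvCond_check]
    rw [pvFoldlHead _ _ _ _ _ hstep]
    have eS : ((s : Int) + 1) = ((s + 1 : Nat) : Int) := by push_cast; ring
    rw [eS, ih (s + 1) _ (by omega)]
    rw [List.range_succ_eq_map, List.map_cons, List.map_map, List.sum_cons]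
    have hfun : ((fun t => if pvCond p L (pvWin line L.toNat (s + 1 + t)) = true then (1:Int) else 0) ∘ Nat.succ)
        = fun t => if pvCond p L (pvWin line L.toNat (s + 1 + 1 + t)) = true then (1:Int) else 0 := by
      funext t
      simp only [Function.comp_apply]
      have e : s + 1 + (t + 1) = s + 1 + 1 + t := by omega
      rw [Nat.succ_eq_add_one, e]
    rw [hfun]
    split_ifs <;> ring

lemma pvLine_eq (line : List Int) (p L : Int) (hL : 1 ≤ L) (init : Int) :
    (PySem.List.pyRange 0 ((line.length : Int) - L + 1) 1).foldl
      (fun c s =>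
        if (((PySem.List.pyRange 0 L 1).map fun i => PySem.List.pyGetD line (s + i) 0).all fun q => q == p || q == 0)
            && ((PySem.List.count ((PySem.List.pyRange 0 L 1).map fun i => PySem.List.pyGetD line (s + i) 0) p : Nat) : Int) == L - 1
        then c + 1 else c) init
    = init + pvCountLine line p L := by
  have hbody : (fun (c : Int) (s : Int) =>
      if (((PySem.List.pyRange 0 L 1).map fun i => PySem.List.pyGetD line (s + i) 0).all fun q => q == p || q == 0)
          && ((PySem.List.count ((PySem.List.pyRange 0 L 1).map fun i => PySem.List.pyGetD line (s + i) 0) p : Nat) : Int) == L - 1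
      then c + 1 else c)
      = (fun (c : Int) (s : Int) =>
          if pvCond p L ((PySem.List.pyRange 0 L 1).map fun i => PySem.List.pyGetD line (s + i) 0)
          then c + 1 else c) := rfl
  rw [hbody]
  by_cases hn : (line.length : Int) < L
  · rw [PySem.List.pyRange_one_eq_nil (a := 0) (b := (line.length : Int) - L + 1) (by omega)]
    have h0 : pvCountLine line p L = 0 := by
      unfold pvCountLine
      rw [if_pos (by simp; omega)]
    rw [h0]
    simp
  · rw [not_lt] at hn
    rw [PySem.List.foldl_if_add_one]
    have ht : ((line.length : Int) - L + 1 - 0).toNat = line.length - L.toNat + 1 := by omega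
    rw [PySem.List.pyRange_one 0 ((line.length : Int) - L + 1), ht, List.countP_map]
    rw [← PySem.List.sum_map_ite_one_zero]
    have hmapc : (List.range (line.length - L.toNat + 1)).map
          (fun k => if ((fun s => pvCond p L ((PySem.List.pyRange 0 L 1).map fun i => PySem.List.pyGetD line (s + i) 0)) ∘ (fun k : Nat => (0:Int) + ↑k)) k then (1:Int) else 0)
        = (List.range (line.length - L.toNat + 1)).map
          (fun k => if pvCond p L (pvWin line L.toNat k) then (1:Int) else 0) := by
      apply List.map_congr_left
      intro k hk
      simp only [Function.comp_apply, zero_add]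
      rw [pvWin_eq_map line L k hL (by simp at hk; omega)]
    rw [hmapc]
    -- RHS
    unfold pvCountLine
    rw [if_neg (by simp; omega)]
    dsimp only
    rw [PySem.List.slice_to line (by omega : (0:Int) ≤ L)]
    rw [show line.take L.toNat = pvWin line L.toNat 0 from by simp [pvWin]]
    have hs := pvSlide line p L hL (line.length - L.toNat) 0
      (if (((pvWin line L.toNat 0).countP fun x => x != p && x != 0 : Nat) : Int) == 0
          && (((pvWin line L.toNat 0).countP fun x => x == p : Nat) : Int) == L - 1 then (1:Int) else 0)
      (by omega)
    rw [Nat.cast_zero] at hs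
    rw [hs, pvCond_check]
    rw [List.range_succ_eq_map, List.map_cons, List.map_map, List.sum_cons]
    have hfun : ((fun t => if pvCond p L (pvWin line L.toNat t) = true then (1:Int) else 0) ∘ Nat.succ)
        = fun t => if pvCond p L (pvWin line L.toNat (0 + 1 + t)) = true then (1:Int) else 0 := by
      funext t
      simp only [Function.comp_apply]
      have e : Nat.succ t = 0 + 1 + t := by omega
      rw [e]
    rw [hfun]

lemma pvRow_eq (b : List (List Int)) (p L : Int) (hL : 1 ≤ L) (hb : b.length = 6)
    (hlen : ∀ l ∈ b, l.length = 7) (init : Int) :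
    (PySem.List.pyRange 0 6 1).foldl (fun count row =>
      (PySem.List.pyRange 0 (8 - L) 1).foldl (fun count col =>
        if (((PySem.List.pyRange 0 L 1).map fun i => PySem.List.pyGetD (PySem.List.pyGetD b row []) (col + i) 0).all fun q => q == p || q == 0)
            && ((PySem.List.count ((PySem.List.pyRange 0 L 1).map fun i => PySem.List.pyGetD (PySem.List.pyGetD b row []) (col + i) 0) p : Nat) : Int) == L - 1
        then count + 1 else count) count) init
    = init + (b.map (fun line => pvCountLine line p L)).sum := by
  rw [PySem.List.foldl_congr_mem (PySem.List.pyRange 0 6 1) _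
    (fun count row => count + pvCountLine (PySem.List.pyGetD b row []) p L) init ?_]
  · rw [show (0:Int) = 0 from rfl, show (6:Int) = PySem.List.len b from by simp [PySem.List.len, hb]]
    rw [PySem.List.foldl_pyRange_zero_pyGetD b [] (fun acc line => acc + pvCountLine line p L) init]
    rw [PySem.List.foldl_add]
  · intro acc row hrow
    rw [PySem.List.mem_pyRange_one] at hrow
    have hmem : PySem.List.pyGetD b row [] ∈ b :=
      PySem.List.pyGetD_mem b [] (by constructor <;> omega)
    have h7 : (((PySem.List.pyGetD b row []).length : Int)) = 7 := by
      rw [hlen _ hmem]; rfl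
    rw [show (8:Int) - L = (((PySem.List.pyGetD b row []).length : Int)) - L + 1 from by rw [h7]; ring]
    exact pvLine_eq (PySem.List.pyGetD b row []) p L hL acc

lemma pvCol_eq (b : List (List Int)) (p L c : Int) (hL : 1 ≤ L) (init : Int) :
    (PySem.List.pyRange 0 (7 - L) 1).foldl (fun count row =>
        if (((PySem.List.pyRange 0 L 1).map fun i => PySem.List.pyGetD (PySem.List.pyGetD b (row + i) []) c 0).all fun q => q == p || q == 0)
            && ((PySem.List.count ((PySem.List.pyRange 0 L 1).map fun i => PySem.List.pyGetD (PySem.List.pyGetD b (row + i) []) c 0) p : Nat) : Int) == L - 1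
        then count + 1 else count) init
    = init + pvCountLine ((PySem.List.pyRange 0 6 1).map fun r => PySem.List.pyGetD (PySem.List.pyGetD b r []) c 0) p L := by
  have hcl : ((((PySem.List.pyRange 0 6 1).map fun r => PySem.List.pyGetD (PySem.List.pyGetD b r []) c 0).length : Int)) = 6 := by
    rw [List.length_map, PySem.List.length_pyRange_one]; rfl
  rw [show (7:Int) - L = ((((PySem.List.pyRange 0 6 1).map fun r => PySem.List.pyGetD (PySem.List.pyGetD b r []) c 0).length : Int)) - L + 1 from by rw [hcl]; ring]
  rw [PySem.List.foldl_congr_mem _ _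
    (fun count s =>
        if pvCond p L ((PySem.List.pyRange 0 L 1).map fun i =>
            PySem.List.pyGetD ((PySem.List.pyRange 0 6 1).map fun r => PySem.List.pyGetD (PySem.List.pyGetD b r []) c 0) (s + i) 0)
        then count + 1 else count) init ?_]
  · exact pvLine_eq _ p L hL init
  · intro acc row hrow
    rw [PySem.List.mem_pyRange_one, hcl] at hrow
    have hwin : ((PySem.List.pyRange 0 L 1).map fun i => PySem.List.pyGetD (PySem.List.pyGetD b (row + i) []) c 0)
        = ((PySem.List.pyRange 0 L 1).map fun i =>
            PySem.List.pyGetD ((PySem.List.pyRange 0 6 1).map fun r => PySem.List.pyGetD (PySem.List.pyGetD b r []) c 0) (row + i) 0) := by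
      apply List.map_congr_left
      intro i hi
      rw [PySem.List.mem_pyRange_one] at hi
      rw [PySem.List.pyGetD_map_pyRange_of_nonneg (fun r => PySem.List.pyGetD (PySem.List.pyGetD b r []) c 0) 6 (row + i) 0 (by omega) (by omega)]
    rw [hwin]
    rfl



lemma pvHeadD_getD (l : List Int) : l.headD 0 = l.getD 0 0 := by cases l <;> rfl

lemma pvZipGo_eq_index (m : Nat) : ∀ (l0 : List Int) (rest : List (List Int)),
    l0.length = m → (∀ l ∈ rest, l.length = m) →
    pvZipGo l0 rest = (List.range m).map (fun j => l0.getD j 0 :: rest.map (fun l => l.getD j 0)) := by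
  induction m with
  | zero =>
    intro l0 rest h0 _
    rw [List.length_eq_zero_iff] at h0
    subst h0
    rfl
  | succ m ih =>
    intro l0 rest h0 hrest
    obtain ⟨a, t, rfl⟩ : ∃ a t, l0 = a :: t := by
      cases l0 with
      | nil => simp at h0
      | cons a t => exact ⟨a, t, rfl⟩
    have hne : rest.all (fun l => !l.isEmpty) = true := by
      rw [List.all_eq_true]
      intro l hl
      have := hrest l hl
      cases l with
      | nil => simp at this
      | cons b u => rfl
    rw [pvZipGo, if_pos hne]
    rw [ih t (rest.map List.tail) (by simpa using h0)
      (by intro l hl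
          simp only [List.mem_map] at hl
          obtain ⟨l', hl', rfl⟩ := hl
          have := hrest l' hl'
          cases l' with
          | nil => simp at this
          | cons b u => simpa using this)]
    rw [List.range_succ_eq_map, List.map_cons, List.map_map]
    congr 1
    · rw [show (a :: t).getD 0 0 = a from rfl]
      congr 1
      apply List.map_congr_left
      intro l hl
      rw [pvHeadD_getD]
    · apply List.map_congr_left
      intro j _
      simp only [Function.comp_apply, Nat.succ_eq_add_one, List.getD_cons_succ, List.map_map]
      congr 1
      apply List.map_congr_left
      intro l hl
      have := hrest l hl
      cases l with
      | nil => simp at this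
      | cons b u => simp

lemma pvZipT_eq_index (m : Nat) (ls : List (List Int)) (hne : ls ≠ [])
    (hlen : ∀ l ∈ ls, l.length = m) :
    pvZipT ls = (List.range m).map (fun j => ls.map (fun l => l.getD j 0)) := by
  cases ls with
  | nil => cases hne rfl
  | cons l0 rest =>
    show pvZipGo l0 rest = _
    rw [pvZipGo_eq_index m l0 rest (hlen l0 (by simp)) (fun l hl => hlen l (by simp [hl]))]
    rfl

lemma pvZipGo_mem_length : ∀ (l0 : List Int) (rest : List (List Int)),
    ∀ l ∈ pvZipGo l0 rest, l.length = rest.length + 1 := by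
  intro l0
  induction l0 with
  | nil => intro rest l hl; cases hl
  | cons a t ih =>
    intro rest l hl
    rw [pvZipGo] at hl
    by_cases hc : rest.all (fun l => !l.isEmpty) = true
    · rw [if_pos hc] at hl
      rcases List.mem_cons.mp hl with rfl | hl
      · simp
      · have := ih (rest.map List.tail) l hl
        simpa using this
    · rw [if_neg hc] at hl
      cases hl

lemma pvZipT_mem_length (ls : List (List Int)) : ∀ l ∈ pvZipT ls, l.length = ls.length := by
  cases ls with
  | nil => intro l hl; cases hl
  | cons l0 rest =>
    intro l hl
    have := pvZipGo_mem_length l0 rest l hl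
    simpa using this

lemma pvZip_cols (rows : List (List Int)) (h6 : rows.length = 6)
    (h7 : ∀ l ∈ rows, l.length = 7) :
    pvZipT rows = (PySem.List.pyRange 0 7 1).map (fun c =>
      (PySem.List.pyRange 0 6 1).map fun r => PySem.List.pyGetD (PySem.List.pyGetD rows r []) c 0) := by
  rw [pvZipT_eq_index 7 rows (by intro h; rw [h] at h6; cases h6) h7]
  rw [show PySem.List.pyRange 0 7 1 = (List.range 7).map (fun j : Nat => (j : Int)) from by decide]
  rw [List.map_map]
  apply List.map_congr_left
  intro j _
  simp only [Function.comp_apply]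
  rw [show (fun r => PySem.List.pyGetD (PySem.List.pyGetD rows r []) ((j : Nat) : Int) 0)
      = ((fun l => PySem.List.pyGetD l ((j : Nat) : Int) 0) ∘ (fun r => PySem.List.pyGetD rows r [])) from rfl]
  rw [← List.map_map]
  rw [show (6:Int) = PySem.List.len rows from by simp [PySem.List.len, h6]]
  rw [PySem.List.map_pyGetD_pyRange_zero]
  apply List.map_congr_left
  intro l _
  rw [PySem.List.pyGetD_natCast]

lemma pvCountLine_zero (line : List Int) (p L : Int)
    (h : L < 1 ∨ (line.length : Int) < L) : pvCountLine line p L = 0 := by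
  unfold pvCountLine
  rw [if_pos (by simp; omega)]

lemma pvAZero (board : List Int) (p L : Int) (h : L < 1 ∨ 8 ≤ L) :
    count_patterns_py board p L = 0 := by
  unfold count_patterns_py
  dsimp only
  have key : ∀ (bnd : Int), bnd ≤ 8 - L → ∀ (g : Int → Int) (init : Int),
      (PySem.List.pyRange 0 bnd 1).foldl (fun count s =>
        if (((PySem.List.pyRange 0 L 1).map fun i => g (s + i)).all fun q => q == p || q == 0)
            && ((PySem.List.count ((PySem.List.pyRange 0 L 1).map fun i => g (s + i)) p : Nat) : Int) == L - 1
        then count + 1 else count) init = init := by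
    intro bnd hbnd g init
    rcases h with h | h
    · rw [PySem.List.foldl_if_add_one]
      rw [List.countP_eq_zero.mpr ?_]
      · simp
      · intro s _
        rw [PySem.List.pyRange_one_eq_nil (a := 0) (b := L) (by omega), List.map_nil]
        simp [PySem.List.count_eq]
        omega
    · rw [PySem.List.pyRange_one_eq_nil (a := 0) (b := bnd) (by omega)]
      rfl
  rw [PySem.List.foldl_congr_mem (PySem.List.pyRange 0 6 1) _ (fun (count : Int) (_ : Int) => count) 0
    (by intro acc row _
        exact key (8 - L) (by omega)
          (fun t => PySem.List.pyGetD (PySem.List.pyGetD ((PySem.List.pyRange 0 42 7).map (fun i => PySem.List.slice board (some i) (some (i + 7)))) row []) t 0) acc)]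
  rw [List.foldl_fixed]
  rw [PySem.List.foldl_congr_mem (PySem.List.pyRange 0 7 1) _ (fun (count : Int) (_ : Int) => count) 0
    (by intro acc col _
        exact key (7 - L) (by omega)
          (fun t => PySem.List.pyGetD (PySem.List.pyGetD ((PySem.List.pyRange 0 42 7).map (fun i => PySem.List.slice board (some i) (some (i + 7)))) t []) col 0) acc)]
  rw [List.foldl_fixed]

lemma pvRowsLen (board : List Int) :
    ∀ l ∈ (PySem.List.pyRange 0 42 7).map (fun i => PySem.List.slice board (some i) (some (i + 7))), l.length ≤ 7 := by
  intro l hl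
  rw [show PySem.List.pyRange 0 42 7 = [0,7,14,21,28,35] from by decide] at hl
  simp only [List.mem_map] at hl
  obtain ⟨i, hi, rfl⟩ := hl
  fin_cases hi <;>
  · rw [PySem.List.slice_toNat board (by norm_num) (by norm_num)]
    simp only [List.length_take, List.length_drop]
    omega

lemma pvAltZero (board : List Int) (p L : Int) (h : L < 1 ∨ 8 ≤ L) :
    count_patterns_py_alt board p L = 0 := by
  unfold count_patterns_py_alt
  dsimp only
  rw [PySem.List.foldl_add, PySem.List.foldl_add]
  have hrows := pvRowsLen board
  have hb6 : ((PySem.List.pyRange 0 42 7).map (fun i => PySem.List.slice board (some i) (some (i + 7)))).length = 6 := by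
    rw [show PySem.List.pyRange 0 42 7 = [0,7,14,21,28,35] from by decide]
    rfl
  have h1 : (((PySem.List.pyRange 0 42 7).map (fun i => PySem.List.slice board (some i) (some (i + 7)))).map
      (fun line => pvCountLine line p L)).sum = 0 := by
    apply List.sum_eq_zero
    intro x hx
    obtain ⟨l, hl, rfl⟩ := List.mem_map.mp hx
    have hlen7 := hrows l hl
    exact pvCountLine_zero l p L (by omega)
  have h2 : ((pvZipT ((PySem.List.pyRange 0 42 7).map (fun i => PySem.List.slice board (some i) (some (i + 7))))).map
      (fun line => pvCountLine line p L)).sum = 0 := by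
    apply List.sum_eq_zero
    intro x hx
    obtain ⟨l, hl, rfl⟩ := List.mem_map.mp hx
    have hlen := pvZipT_mem_length _ l hl
    rw [hb6] at hlen
    exact pvCountLine_zero l p L (by omega)
  rw [h1, h2]
  simp

-- ===== VERDICT (by name: the statement is the Claim_ definition above) =====
theorem count_patterns_py_spec : Claim_equal_count_patterns_py := by
  unfold Claim_equal_count_patterns_py
  intro board player length hdom hpre
  unfold Spec_count_patterns_py
  by_cases hcase : 1 ≤ length ∧ length ≤ 7
  · obtain ⟨hL, hL7⟩ := hcase
    have h42 : 42 ≤ board.length := hpre ⟨hL, hL7⟩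
    unfold count_patterns_py count_patterns_py_alt
    dsimp only
    have hb6 : ((PySem.List.pyRange 0 42 7).map (fun i => PySem.List.slice board (some i) (some (i + 7)))).length = 6 := by
      rw [show PySem.List.pyRange 0 42 7 = [0,7,14,21,28,35] from by decide]
      rfl
    have hlen : ∀ l ∈ (PySem.List.pyRange 0 42 7).map (fun i => PySem.List.slice board (some i) (some (i + 7))), l.length = 7 := by
      intro l hl
      rw [show PySem.List.pyRange 0 42 7 = [0,7,14,21,28,35] from by decide] at hl
      simp only [List.mem_map] at hl
      obtain ⟨i, hi, rfl⟩ := hl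
      fin_cases hi <;>
      · rw [PySem.List.slice_toNat board (by norm_num) (by norm_num)]
        simp only [List.length_take, List.length_drop]
        omega
    rw [pvZip_cols _ hb6 hlen]
    rw [pvRow_eq _ player length hL hb6 hlen 0]
    rw [PySem.List.foldl_congr_mem (PySem.List.pyRange 0 7 1) _
      (fun count col => count + pvCountLine ((PySem.List.pyRange 0 6 1).map fun r =>
        PySem.List.pyGetD (PySem.List.pyGetD ((PySem.List.pyRange 0 42 7).map (fun i => PySem.List.slice board (some i) (some (i + 7)))) r []) col 0) player length) _ ?_]
    · rw [PySem.List.foldl_add, PySem.List.foldl_add, PySem.List.foldl_add, List.map_map]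
      rfl
    · intro acc col _
      exact pvCol_eq _ player length col hL acc
  · have h : length < 1 ∨ 8 ≤ length := by omega
    rw [pvAZero board player length h, pvAltZero board player length h]
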